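-- pv_equiv track=rewrite | github.com/AllanKoder/Competitive-Programming-Training | codeforces-practice/1600s/potions.py | solve
-- ===== SOURCE A (Python) =====
-- import heapq
--
-- def solve(potions):
--     n = len(potions)
--     current_health = 0
--     taken_potions = 0
--
--     largest_bad_potions = []
--     for i in range(n):
--         if potions[i] > 0:
--             current_health += potions[i]
--             taken_potions += 1
--         else:
--             heapq.heappush(largest_bad_potions, potions[i])
--             current_health += potions[i]
--             taken_potions += 1
--             while current_health < 0:
--                 largest_bad_potion = heapq.heappop(largest_bad_potions)
--                 current_health -= largest_bad_potion
--                 taken_potions -= 1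
--
--     return taken_potions
-- ===== SOURCE B (Python) =====
-- def solve(potions):
--     # dp[k] = maximum health achievable after drinking exactly k potions so far
--     # (feasible sizes are downward closed, so dp is a plain list); answer = largest feasible k.
--     dp = [0]
--     for p in potions:
--         nxt = [0]
--         for prev, cur in zip(dp, dp[1:]):
--             c = prev + p
--             nxt.append(max(cur, c) if c >= 0 else cur)
--         if dp[-1] + p >= 0:
--             nxt.append(dp[-1] + p)
--         dp = nxt
--     return len(dp) - 1
-- ===== Notes on version B (the rewrite author's own statement) =====
-- stated objective: alternative
-- what changed: B replaces A's greedy heap (push, pop the minimum while health is negative) by a dynamic program over the number of potions drunk: dp[k] = maximum health achievable after drinking exactly k potions, updated per potion, answer = largest feasible k; no heap, no popping, no greedy choice.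
import Mathlib
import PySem

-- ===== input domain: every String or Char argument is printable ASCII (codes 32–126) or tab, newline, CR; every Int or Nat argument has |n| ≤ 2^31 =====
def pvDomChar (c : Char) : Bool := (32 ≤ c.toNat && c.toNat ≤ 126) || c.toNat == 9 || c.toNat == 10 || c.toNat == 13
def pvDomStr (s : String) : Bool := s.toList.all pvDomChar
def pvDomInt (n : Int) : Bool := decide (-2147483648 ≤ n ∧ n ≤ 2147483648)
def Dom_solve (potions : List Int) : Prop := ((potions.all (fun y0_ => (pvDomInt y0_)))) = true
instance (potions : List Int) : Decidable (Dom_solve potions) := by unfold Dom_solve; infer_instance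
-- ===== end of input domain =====

-- B replaces A's greedy heap (pop the minimum while health < 0) by a dynamic program over the
-- number of potions drunk (dp[k] = max health after drinking exactly k); alternative algorithm, no heap.


-- ===== PORT A =====
-- model of heapq's heap as a sorted list: heappush = ordered insert (exact as a min-extraction structure)
def heapPush (x : Int) : List Int → List Int
  | [] => [x]
  | a :: l => if x ≤ a then x :: a :: l else a :: heapPush x l

-- A's inner `while current_health < 0:` loop (heappop = take the head of the sorted list);
-- the `[]` case is Python's heappop IndexError, unreachable from solve's loop
def popLoop (h t : Int) : List Int → Int × Int × List Int
  | [] => (h, t, [])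
  | m :: rest => if h < 0 then popLoop (h - m) (t - 1) rest else (h, t, m :: rest)

def stepA (s : Int × Int × List Int) (p : Int) : Int × Int × List Int :=
  if p > 0 then (s.1 + p, s.2.1 + 1, s.2.2)
  else popLoop (s.1 + p) (s.2.1 + 1) (heapPush p s.2.2)

def solve (potions : List Int) : Int :=
  (potions.foldl stepA ((0 : Int), (0 : Int), ([] : List Int))).2.1

-- ===== PORT B =====
-- B's inner loop over adjacent pairs of dp (Python's zip(dp, dp[1:]) plus the dp[-1] tail append):
-- the singleton case is the `if dp[-1] + p >= 0: nxt.append(dp[-1] + p)` tail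
def dpStep (p : Int) : List Int → List Int
  | [] => []                               -- unreachable: dp always starts with 0
  | [a] => if 0 ≤ a + p then [a + p] else []
  | a :: b :: rest => (if 0 ≤ a + p then max b (a + p) else b) :: dpStep p (b :: rest)

def solve_alt (potions : List Int) : Int :=
  ((potions.foldl (fun dp p => 0 :: dpStep p dp) [0]).length : Int) - 1

-- ===== PRECONDITION & SPEC =====
def Spec_solve (potions : List Int) (out : Int) : Prop := out = solve_alt potions
instance (potions : List Int) (out : Int) : Decidable (Spec_solve potions out) := by unfold Spec_solve; infer_instance

-- ===== CLAIM (what is proved, stated in full; the proofs are below) =====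
def Claim_equal_solve : Prop := ∀ (potions : List Int), Dom_solve potions → Spec_solve potions (solve potions)

-- ===== LEMMAS AND PROOFS =====

-- greedy model: B's previous form — the full kept multiset as a sorted list, used only in the proof
def stepG (s : Int × List Int) (p : Int) : Int × List Int :=
  let heap := heapPush p s.2
  let h := s.1 + p
  if h < 0 then
    match heap with
    | [] => (h, [])
    | m :: rest => (h - m, rest)
  else (h, heap)

theorem mem_heapPush {x b : Int} {l : List Int} : b ∈ heapPush x l ↔ b = x ∨ b ∈ l := by
  induction l with
  | nil => simp [heapPush]
  | cons a l ih =>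
    simp only [heapPush]
    split
    · simp
    · simp [ih]; tauto

theorem length_heapPush (x : Int) (l : List Int) : (heapPush x l).length = l.length + 1 := by
  induction l with
  | nil => rfl
  | cons a l ih => simp only [heapPush]; split <;> simp [ih]

theorem sum_heapPush (x : Int) (l : List Int) : (heapPush x l).sum = x + l.sum := by
  induction l with
  | nil => simp [heapPush]
  | cons a l ih => simp only [heapPush]; split <;> simp [ih] <;> ring

theorem sorted_heapPush {x : Int} {l : List Int} (hs : List.Pairwise (· ≤ ·) l) :
    List.Pairwise (· ≤ ·) (heapPush x l) := by
  induction l with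
  | nil => simp [heapPush]
  | cons a l ih =>
    rw [List.pairwise_cons] at hs
    simp only [heapPush]
    split
    · rename_i hxa
      rw [List.pairwise_cons]
      constructor
      · intro b hb
        rcases List.mem_cons.1 hb with rfl | hb'
        · exact hxa
        · exact le_trans hxa (hs.1 b hb')
      · rw [List.pairwise_cons]; exact hs
    · rename_i hxa
      rw [List.pairwise_cons]
      refine ⟨?_, ih hs.2⟩
      intro b hb
      rcases mem_heapPush.1 hb with hbx | hbl
      · omega
      · exact hs.1 b hbl

-- filtering out a positive insertion leaves the nonpositive part untouched
theorem filter_heapPush_pos {x : Int} (hx : 0 < x) (l : List Int) :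
    (heapPush x l).filter (fun y => y ≤ 0) = l.filter (fun y => y ≤ 0) := by
  induction l with
  | nil => simp [heapPush]; omega
  | cons a l ih =>
    simp only [heapPush]
    split
    · simp only [List.filter_cons]
      have : ¬ (x ≤ 0) := by omega
      simp [this]
    · simp only [List.filter_cons]
      by_cases ha : a ≤ 0 <;> simp [ha, ih]

-- inserting a nonpositive element commutes with the nonpositive filter on a sorted list
theorem filter_heapPush_nonpos {x : Int} (hx : x ≤ 0) {l : List Int}
    (hs : List.Pairwise (· ≤ ·) l) :
    (heapPush x l).filter (fun y => y ≤ 0) = heapPush x (l.filter (fun y => y ≤ 0)) := by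
  induction l with
  | nil => simp [heapPush, hx]
  | cons a l ih =>
    rw [List.pairwise_cons] at hs
    simp only [heapPush]
    split
    · rename_i hxa
      by_cases ha : a ≤ 0
      · simp [hx, ha, heapPush, hxa]
      · have hfl : l.filter (fun y => y ≤ 0) = [] := by
          rw [List.filter_eq_nil_iff]
          intro b hb
          have := hs.1 b hb
          simp; omega
        simp [hx, ha, hfl, heapPush]
    · rename_i hxa
      have ha : a ≤ 0 := by omega
      simp [ha, heapPush, hxa, ih hs.2]

-- the invariant tying A's state to the greedy model's state
def StInv (sA : Int × Int × List Int) (sG : Int × List Int) : Prop :=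
  sA.1 = sG.1 ∧ sA.2.1 = (sG.2.length : Int) ∧
  sA.2.2 = sG.2.filter (fun y => y ≤ 0) ∧
  List.Pairwise (· ≤ ·) sG.2 ∧ 0 ≤ sG.1 ∧ sG.1 = sG.2.sum

theorem popLoop_of_nonneg {h : Int} (t : Int) (l : List Int) (hh : 0 ≤ h) :
    popLoop h t l = (h, t, l) := by
  cases l with
  | nil => rfl
  | cons m rest => simp [popLoop]; omega

theorem step_StInv {sA : Int × Int × List Int} {sG : Int × List Int} (hI : StInv sA sG) (p : Int) :
    StInv (stepA sA p) (stepG sG p) := by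
  obtain ⟨hB, heapB⟩ := sG
  obtain ⟨hA, tA, heapA⟩ := sA
  obtain ⟨h1, h2, h3, h4, h5, h6⟩ := hI
  simp only at h1 h2 h3 h4 h5 h6
  subst h1 h2 h3
  by_cases hp : p > 0
  · -- positive potion: no pop on either side
    have hnn : ¬ (hA + p < 0) := by omega
    simp only [stepA, stepG]
    rw [if_pos hp, if_neg hnn]
    exact ⟨rfl, by simp [length_heapPush], by simp [filter_heapPush_pos hp],
      sorted_heapPush h4, by omega, by rw [sum_heapPush]; omega⟩
  · have hp' : p ≤ 0 := by omega
    have hfilter := filter_heapPush_nonpos hp' h4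
    have hps : List.Pairwise (· ≤ ·) (heapPush p heapB) := sorted_heapPush h4
    by_cases hneg : hA + p < 0
    · -- health went negative: exactly one pop restores it
      obtain ⟨m, rest, hmr⟩ : ∃ m rest, heapPush p heapB = m :: rest := by
        cases hE : heapPush p heapB with
        | nil => cases heapB <;> simp only [heapPush] at hE <;> [skip; split at hE] <;> simp_all
        | cons m rest => exact ⟨m, rest, rfl⟩
      have hmp : m ≤ p := by
        have hmem : p ∈ heapPush p heapB := mem_heapPush.2 (Or.inl rfl)
        rw [hmr] at hmem hps
        rw [List.pairwise_cons] at hps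
        rcases List.mem_cons.1 hmem with rfl | hmem'
        · rfl
        · exact hps.1 p hmem'
      have hm0 : m ≤ 0 := by omega
      have hAheap : heapPush p (heapB.filter (fun y => y ≤ 0)) = m :: rest.filter (fun y => y ≤ 0) := by
        rw [← hfilter, hmr, List.filter_cons]
        simp [hm0]
      have hlen : heapB.length + 1 = rest.length + 1 := by
        have := length_heapPush p heapB
        rw [hmr] at this; simp at this; omega
      have hsum : heapB.sum + p = m + rest.sum := by
        have := sum_heapPush p heapB
        rw [hmr] at this; simp at this; omega
      simp only [stepA, stepG]
      rw [if_neg hp, hmr, if_pos hneg, hAheap]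
      simp only [popLoop]
      rw [if_pos hneg, popLoop_of_nonneg _ _ (by omega)]
      refine ⟨by ring, by push_cast; omega, rfl, ?_, by omega, by dsimp only; omega⟩
      rw [hmr, List.pairwise_cons] at hps
      exact hps.2
    · -- nonpositive potion but health stays nonnegative: push, no pop
      simp only [stepA, stepG]
      rw [if_neg hp, if_neg hneg, popLoop_of_nonneg _ _ (by omega)]
      exact ⟨rfl, by simp [length_heapPush], hfilter.symm, hps, by omega,
        by rw [sum_heapPush]; omega⟩

-- ===== top-k sums: the bridge between the greedy kept multiset and B's dp table =====
-- topk S k = sum of the k largest elements of the ascending-sorted list S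
def topk (S : List Int) (k : Nat) : Int := (S.drop (S.length - k)).sum

theorem topk_zero (S : List Int) : topk S 0 = 0 := by
  simp [topk]

theorem topk_len (S : List Int) : topk S S.length = S.sum := by
  simp [topk]

theorem topk_cons {T : List Int} (x : Int) {k : Nat} (hk : k ≤ T.length) :
    topk (x :: T) k = topk T k := by
  unfold topk
  have h : (x :: T).length - k = (T.length - k) + 1 := by simp; omega
  rw [h, List.drop_succ_cons]

theorem topk_step {L : List Int} {k : Nat} (h1 : 1 ≤ k) (h2 : k ≤ L.length) :
    topk L k = L[L.length - k]'(by omega) + topk L (k - 1) := by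
  unfold topk
  have hlt : L.length - k < L.length := by omega
  rw [List.drop_eq_getElem_cons hlt, List.sum_cons]
  have : L.length - (k - 1) = (L.length - k) + 1 := by omega
  rw [this]

-- every suffix of an ascending list with nonnegative total has nonnegative sum
theorem drop_sum_nonneg {S : List Int} (hs : List.Pairwise (· ≤ ·) S) (h0 : 0 ≤ S.sum) :
    ∀ j, 0 ≤ (S.drop j).sum := by
  induction S with
  | nil => intro j; simp
  | cons a T ih =>
    intro j
    have htail : 0 ≤ T.sum := by
      by_cases ha : a ≤ 0
      · simp at h0; omega
      · refine List.sum_nonneg ?_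
        intro x hx
        rw [List.pairwise_cons] at hs
        have := hs.1 x hx
        omega
    cases j with
    | zero => simpa using h0
    | succ j =>
      rw [List.drop_succ_cons]
      exact ih (List.pairwise_cons.mp hs).2 htail j

theorem topk_nonneg {S : List Int} (hs : List.Pairwise (· ≤ ·) S) (h0 : 0 ≤ S.sum) (k : Nat) :
    0 ≤ topk S k := drop_sum_nonneg hs h0 _

theorem topk_heapPush_top {S : List Int} (p : Int) :
    topk (heapPush p S) (S.length + 1) = S.sum + p := by
  have h := topk_len (heapPush p S)
  rw [length_heapPush] at h
  rw [h, sum_heapPush]; ring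

theorem sorted_head_le {a : Int} {T : List Int}
    (hs : List.Pairwise (· ≤ ·) (a :: T)) : ∀ y ∈ a :: T, a ≤ y := by
  intro y hy
  rcases List.mem_cons.1 hy with rfl | hy'
  · exact le_rfl
  · exact (List.pairwise_cons.mp hs).1 y hy'

-- adding an element below every element of L cannot beat adding the k-th largest
theorem topk_pred_le {L : List Int} {k : Nat} (h1 : 1 ≤ k) (h2 : k ≤ L.length)
    {x : Int} (hx : ∀ y ∈ L, x ≤ y) : topk L (k - 1) + x ≤ topk L k := by
  rw [topk_step h1 h2]
  have hmem : x ≤ L[L.length - k]'(by omega) := hx _ (List.getElem_mem _)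
  omega

-- the key insertion identity: top-k sums after an ordered insert
theorem topk_heapPush {S : List Int} (hs : List.Pairwise (· ≤ ·) S) (p : Int) :
    ∀ k, 1 ≤ k → k ≤ S.length →
      topk (heapPush p S) k = max (topk S k) (topk S (k - 1) + p) := by
  induction S with
  | nil => intro k h1 h2; simp at h2; omega
  | cons a T ih =>
    intro k h1 h2
    have hsT : List.Pairwise (· ≤ ·) T := (List.pairwise_cons.mp hs).2
    simp only [List.length_cons] at h2
    simp only [heapPush]
    split
    · rename_i hpa  -- p ≤ a: p becomes the new minimum, top-k sums unchanged
      rw [topk_cons p (by simp; omega)]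
      have hle : topk (a :: T) (k - 1) + p ≤ topk (a :: T) k := by
        refine topk_pred_le h1 (by simp; omega) ?_
        intro y hy
        exact le_trans hpa (sorted_head_le hs y hy)
      exact (max_eq_left hle).symm
    · rename_i hpa  -- a < p
      by_cases hk : k ≤ T.length
      · rw [topk_cons a (by rw [length_heapPush]; omega),
            ih hsT k h1 hk, topk_cons a hk, topk_cons a (by omega)]
      · have hk1 : k = T.length + 1 := by omega
        subst hk1
        rw [topk_cons a (by rw [length_heapPush]), topk_heapPush_top]
        have e1 : topk (a :: T) (T.length + 1) = a + T.sum := by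
          have := topk_len (a :: T); simpa using this
        have e2 : topk (a :: T) (T.length + 1 - 1) = T.sum := by
          simp only [Nat.add_sub_cancel]
          rw [topk_cons a le_rfl, topk_len]
        rw [e1, e2, max_eq_right (by omega)]

-- ===== dpStep characterisation =====
theorem dpStep_getD_last {p : Int} :
    ∀ {dp : List Int}, dp ≠ [] → 0 ≤ dp.getD (dp.length - 1) 0 + p →
      (dpStep p dp).getD (dp.length - 1) 0 = dp.getD (dp.length - 1) 0 + p := by
  intro dp
  induction dp with
  | nil => intro h; exact absurd rfl h
  | cons a tl ih =>
    cases tl with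
    | nil =>
      intro _ h2
      simp at h2
      simp [dpStep, h2]
    | cons b rest =>
      intro _ h2
      have e1 : (a :: b :: rest).length - 1 = ((b :: rest).length - 1) + 1 := by
        simp
      rw [e1] at h2 ⊢
      rw [List.getD_cons_succ] at h2 ⊢
      simp only [dpStep, List.getD_cons_succ]
      exact ih (by simp) h2

theorem dpStep_length_keep {p : Int} :
    ∀ {dp : List Int}, dp ≠ [] → 0 ≤ dp.getD (dp.length - 1) 0 + p →
      (dpStep p dp).length = dp.length := by
  intro dp
  induction dp with
  | nil => intro h; exact absurd rfl h
  | cons a tl ih =>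
    cases tl with
    | nil =>
      intro _ h2
      simp at h2
      simp [dpStep, h2]
    | cons b rest =>
      intro _ h2
      have e1 : (a :: b :: rest).length - 1 = ((b :: rest).length - 1) + 1 := by simp
      rw [e1, List.getD_cons_succ] at h2
      simp only [dpStep, List.length_cons]
      rw [ih (by simp) h2]
      simp

theorem dpStep_length_drop {p : Int} :
    ∀ {dp : List Int}, dp ≠ [] → dp.getD (dp.length - 1) 0 + p < 0 →
      (dpStep p dp).length + 1 = dp.length := by
  intro dp
  induction dp with
  | nil => intro h; exact absurd rfl h
  | cons a tl ih =>
    cases tl with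
    | nil =>
      intro _ h2
      simp at h2
      simp [dpStep, show ¬ 0 ≤ a + p by omega]
    | cons b rest =>
      intro _ h2
      have e1 : (a :: b :: rest).length - 1 = ((b :: rest).length - 1) + 1 := by simp
      rw [e1, List.getD_cons_succ] at h2
      simp only [dpStep, List.length_cons]
      have := ih (by simp) h2
      simp only [List.length_cons] at this
      omega

theorem dpStep_getD {p : Int} :
    ∀ {dp : List Int} (i : Nat), i + 1 < dp.length →
      (dpStep p dp).getD i 0 =
        if 0 ≤ dp.getD i 0 + p then max (dp.getD (i + 1) 0) (dp.getD i 0 + p)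
        else dp.getD (i + 1) 0 := by
  intro dp
  induction dp with
  | nil => intro i hi; simp at hi
  | cons a tl ih =>
    cases tl with
    | nil => intro i hi; simp at hi
    | cons b rest =>
      intro i hi
      cases i with
      | zero =>
        simp only [dpStep, List.getD_cons_zero, List.getD_cons_succ]
      | succ j =>
        simp only [List.length_cons] at hi
        simp only [dpStep, List.getD_cons_succ]
        exact ih j (by simp; omega)

-- ===== the G ↔ dp invariant =====
def DpInv (sG : Int × List Int) (dp : List Int) : Prop :=
  dp.length = sG.2.length + 1 ∧ ∀ k, k < dp.length → dp.getD k 0 = topk sG.2 k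

theorem heapPush_ne_nil (x : Int) (l : List Int) : ∃ m rest, heapPush x l = m :: rest := by
  cases l with
  | nil => exact ⟨x, [], rfl⟩
  | cons a t =>
    simp only [heapPush]
    split
    · exact ⟨x, a :: t, rfl⟩
    · exact ⟨a, heapPush x t, rfl⟩

theorem step_DpInv {sG : Int × List Int} {dp : List Int}
    (hs : List.Pairwise (· ≤ ·) sG.2) (hh : 0 ≤ sG.1) (hsum : sG.1 = sG.2.sum)
    (hI : DpInv sG dp) (p : Int) :
    DpInv (stepG sG p) (0 :: dpStep p dp) := by
  obtain ⟨h, S⟩ := sG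
  obtain ⟨hlen, hent⟩ := hI
  simp only at hs hh hsum hlen hent
  subst hsum
  have hne : dp ≠ [] := by intro hE; rw [hE] at hlen; simp at hlen
  have hlast : dp.getD (dp.length - 1) 0 = S.sum := by
    rw [hent (dp.length - 1) (by omega)]
    have e : dp.length - 1 = S.length := by omega
    rw [e, topk_len]
  unfold stepG
  simp only
  by_cases hneg : S.sum + p < 0
  · rw [if_pos hneg]
    obtain ⟨m, rest, hmr⟩ := heapPush_ne_nil p S
    rw [hmr]
    have hdrop := dpStep_length_drop (p := p) hne (by rw [hlast]; omega)
    have hrest : rest.length = S.length := by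
      have := length_heapPush p S
      rw [hmr] at this; simp at this; omega
    constructor
    · simp only [List.length_cons]; omega
    · intro k hk
      simp only [List.length_cons] at hk
      cases k with
      | zero => simp [topk_zero]
      | succ i =>
        have hi : i + 1 ≤ S.length := by omega
        rw [List.getD_cons_succ]
        rw [dpStep_getD i (by omega)]
        rw [hent i (by omega), hent (i + 1) (by omega)]
        have hKI := topk_heapPush hs p (i + 1) (by omega) hi
        simp only [Nat.add_sub_cancel] at hKI
        have ht : topk rest (i + 1) = max (topk S (i + 1)) (topk S i + p) := by
          rw [← hKI, hmr, topk_cons m (by omega)]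
        rw [ht]
        split
        · rfl
        · rename_i hng
          exact (max_eq_left (by
            have := topk_nonneg hs (by omega) (i + 1)
            omega)).symm
  · rw [if_neg hneg]
    have hkeep := dpStep_length_keep (p := p) hne (by rw [hlast]; omega)
    constructor
    · simp only [List.length_cons, length_heapPush]; omega
    · intro k hk
      simp only [List.length_cons] at hk
      cases k with
      | zero => simp [topk_zero]
      | succ i =>
        rw [List.getD_cons_succ]
        by_cases hi : i + 1 ≤ S.length
        · rw [dpStep_getD i (by omega)]
          rw [hent i (by omega), hent (i + 1) (by omega)]
          have hKI := topk_heapPush hs p (i + 1) (by omega) hi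
          simp only [Nat.add_sub_cancel] at hKI
          rw [hKI]
          split
          · rfl
          · rename_i hng
            exact (max_eq_left (by
              have := topk_nonneg hs (by omega) (i + 1)
              omega)).symm
        · have hieq : i = S.length := by omega
          rw [hieq, topk_heapPush_top]
          have hL := dpStep_getD_last (p := p) hne (by rw [hlast]; omega)
          simp only [hlen, Nat.add_sub_cancel] at hL
          rw [hL, hent S.length (by omega), topk_len]

theorem foldl_inv (potions : List Int) {sA : Int × Int × List Int} {sG : Int × List Int}
    {dp : List Int} (h1 : StInv sA sG) (h2 : DpInv sG dp) :
    StInv (potions.foldl stepA sA) (potions.foldl stepG sG) ∧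
    DpInv (potions.foldl stepG sG) (potions.foldl (fun d q => 0 :: dpStep q d) dp) := by
  induction potions generalizing sA sG dp with
  | nil => exact ⟨h1, h2⟩
  | cons p ps ih =>
    exact ih (step_StInv h1 p)
      (step_DpInv h1.2.2.2.1 h1.2.2.2.2.1 h1.2.2.2.2.2 h2 p)

-- ===== VERDICT (by name: the statement is the Claim_ definition above) =====
theorem solve_spec : Claim_equal_solve := by
  intro potions _
  unfold Spec_solve solve solve_alt
  obtain ⟨hA, hD⟩ := foldl_inv potions
    (sA := ((0 : Int), (0 : Int), ([] : List Int))) (sG := ((0 : Int), ([] : List Int)))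
    (dp := [0])
    ⟨rfl, rfl, rfl, List.Pairwise.nil, le_refl 0, rfl⟩
    ⟨rfl, by
      intro k hk
      simp only [List.length_cons, List.length_nil] at hk
      have hk0 : k = 0 := by omega
      subst hk0; rfl⟩
  rw [hA.2.1, hD.1]
  push_cast; ring
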